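-- pv_equiv track=rewrite | github.com/ashishjayamohan/competitive-programming | Practice/oddsum.py | process
-- ===== SOURCE A (Python) =====
-- def process(arr):
--     odd = False
--     even = False
--     for j in arr:
--         if(j % 2 == 0):
--             even = True
--         else:
--             odd = True
--     return odd and even
-- ===== SOURCE B (Python) =====
-- def process(arr):
--     return any(j % 2 != 0 for j in arr) and any(j % 2 == 0 for j in arr)
-- ===== Notes on version B (the rewrite author's own statement) =====
-- stated objective: idiomatic
-- what changed: Replaces the single fused loop maintaining two boolean flags with two independent short-circuiting any() scans for has-odd and has-even, which stop at the first hit.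
import Mathlib
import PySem

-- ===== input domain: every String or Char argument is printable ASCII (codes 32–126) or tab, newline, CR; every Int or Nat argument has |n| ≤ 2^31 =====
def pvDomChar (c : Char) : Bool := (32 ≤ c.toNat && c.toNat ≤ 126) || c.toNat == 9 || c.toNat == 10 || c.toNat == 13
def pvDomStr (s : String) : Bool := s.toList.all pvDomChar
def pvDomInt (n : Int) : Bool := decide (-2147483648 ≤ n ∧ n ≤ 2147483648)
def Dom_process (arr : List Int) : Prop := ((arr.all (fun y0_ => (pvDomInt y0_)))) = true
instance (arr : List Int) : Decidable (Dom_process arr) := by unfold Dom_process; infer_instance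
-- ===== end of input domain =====

-- B replaces A's single fused flag-maintaining loop with two independent short-circuiting scans (idiomatic).

-- ===== PORT A =====
-- literal port: one loop updating the pair (odd, even), then 'odd and even'
def process (arr : List Int) : Bool :=
  let st := arr.foldl (fun (st : Bool × Bool) j =>
    if PySem.Int.mod j 2 = 0 then (st.1, true) else (true, st.2)) (false, false)
  st.1 && st.2

-- ===== PORT B =====
-- two short-circuiting scans, as in Source B's two any(...) generator expressions
def process_alt (arr : List Int) : Bool :=
  (arr.any (fun j => PySem.Int.mod j 2 != 0)) && (arr.any (fun j => PySem.Int.mod j 2 == 0))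

-- ===== PRECONDITION & SPEC =====
def Spec_process (arr : List Int) (out : Bool) : Prop := out = process_alt arr
instance (arr : List Int) (out : Bool) : Decidable (Spec_process arr out) := by unfold Spec_process; infer_instance

-- ===== CLAIM (what is proved, stated in full; the proofs are below) =====
def Claim_equal_process : Prop := ∀ (arr : List Int), Dom_process arr → Spec_process arr (process arr)

-- ===== LEMMAS AND PROOFS =====
lemma process_fold_char (arr : List Int) (o e : Bool) :
    arr.foldl (fun (st : Bool × Bool) j =>
      if PySem.Int.mod j 2 = 0 then (st.1, true) else (true, st.2)) (o, e)
    = (o || arr.any (fun j => PySem.Int.mod j 2 != 0),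
       e || arr.any (fun j => PySem.Int.mod j 2 == 0)) := by
  induction arr generalizing o e with
  | nil => simp
  | cons a t ih =>
    simp only [List.foldl_cons, List.any_cons]
    by_cases h : PySem.Int.mod a 2 = 0
    · rw [if_pos h, ih]; simp only [h]; simp
    · rw [if_neg h, ih]
      have h2 : (PySem.Int.mod a 2 != 0) = true := by simpa using h
      have h3 : (PySem.Int.mod a 2 == 0) = false := by simpa using h
      rw [h2, h3]; simp

-- ===== VERDICT (by name: the statement is the Claim_ definition above) =====
theorem process_spec : Claim_equal_process := by
  intro arr _
  unfold Spec_process process process_alt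
  rw [process_fold_char]
  cases arr.any (fun j => PySem.Int.mod j 2 != 0) <;> cases arr.any (fun j => PySem.Int.mod j 2 == 0) <;> rfl
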